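-- pv_equiv track=rewrite | github.com/aphonologist/directionalHSfooting | gen.py | gen_foot_parallel
-- ===== SOURCE A (Python) =====
-- def gen_foot_parallel(input):
-- 	candidates = set([])
--
-- 	# add fully faithful candidate
-- 	candidates.add(input)
--
-- 	# build candidates of length equal to input
-- 	stack = ['']
-- 	while stack:
-- 		cand = stack.pop()
-- 		for foot in ['s', 'F', 'Tt', 'iI']:
-- 			cand2 = cand + foot
-- 			if len(cand2) == len(input):
-- 				candidates.add(cand2)
-- 			if len(cand2) < len(input):
-- 				stack.append(cand2)
--
-- 	return sorted(list(candidates))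
-- ===== SOURCE B (Python) =====
-- def gen_foot_parallel(input):
-- 	n = len(input)
-- 	# dp[k] = set of all concatenations of feet with total length exactly k
-- 	dp = [{''}]
-- 	for k in range(1, n + 1):
-- 		row = set()
-- 		for foot in ['s', 'F', 'Tt', 'iI']:
-- 			if len(foot) <= k:
-- 				for s in dp[k - len(foot)]:
-- 					row.add(foot + s)
-- 		dp.append(row)
-- 	result = dp[n]
-- 	result.add(input)
-- 	return sorted(result)
-- ===== Notes on version B (the rewrite author's own statement) =====
-- stated objective: alternative
-- what changed: Replaces the DFS over a stack of growing prefixes by a bottom-up length-indexed DP table dp[k] = all foot-concatenations of length k, reusing shorter rows instead of re-extending every prefix.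
import Mathlib
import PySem

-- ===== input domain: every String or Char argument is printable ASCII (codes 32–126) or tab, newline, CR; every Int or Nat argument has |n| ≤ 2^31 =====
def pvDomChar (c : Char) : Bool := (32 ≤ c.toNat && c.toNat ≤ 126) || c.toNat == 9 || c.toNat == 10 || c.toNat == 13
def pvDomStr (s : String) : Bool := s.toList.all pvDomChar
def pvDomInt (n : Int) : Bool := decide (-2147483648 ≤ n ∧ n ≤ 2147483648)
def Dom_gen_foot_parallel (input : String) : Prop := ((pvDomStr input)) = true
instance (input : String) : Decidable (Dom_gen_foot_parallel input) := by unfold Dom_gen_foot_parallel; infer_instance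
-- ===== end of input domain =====

-- B replaces A's DFS over a stack of growing prefixes by a bottom-up length-indexed
-- DP table of foot-concatenations; same return value (alternative decomposition).

-- ===== PORT A =====
-- the literal list ['s', 'F', 'Tt', 'iI'] both programs loop over
def pvTokens : List String := ["s", "F", "Tt", "iI"]

-- the 'for foot in [...]' body for one popped cand: threads (candidates, pushed) through the feet
def pvFeetA (n : Nat) (cand : String) :
    List String → PySem.Set String → List String → PySem.Set String × List String
  | [], cands, pushed => (cands, pushed)
  | f :: fs, cands, pushed =>
      let cand2 := cand ++ f
      pvFeetA n cand fs
        (if cand2.length = n then PySem.Set.add cands cand2 else cands)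
        (if cand2.length < n then pushed ++ [cand2] else pushed)

-- lemma cited by pvLoopA's termination proof: what the inner loop pushes
theorem pvFeetA_snd (n : Nat) (cand : String) :
    ∀ (fs : List String) (cands : PySem.Set String) (pushed : List String),
      (pvFeetA n cand fs cands pushed).2 =
        pushed ++ (fs.filter (fun f => decide ((cand ++ f).length < n))).map (cand ++ ·) := by
  intro fs
  induction fs with
  | nil => intro cands pushed; simp [pvFeetA]
  | cons f fs ih =>
      intro cands pushed
      simp only [pvFeetA, ih, List.filter_cons, String.length_append]
      by_cases h : cand.length + f.length < n <;> simp [h]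

theorem pvFeetA_weight (n : Nat) (cand : String) (cands : PySem.Set String) :
    (((pvFeetA n cand pvTokens cands []).2).map (fun c => 5 ^ (n - c.length))).sum
      < 5 ^ (n - cand.length) := by
  rw [pvFeetA_snd]
  by_cases h : cand.length < n
  · have hlen : ((pvTokens.filter (fun f => decide ((cand ++ f).length < n))).map (cand ++ ·)).length ≤ 4 := by
      simp only [List.length_map]
      calc (pvTokens.filter _).length ≤ pvTokens.length := List.length_filter_le _ _
        _ = 4 := rfl
    calc (((pvTokens.filter (fun f => decide ((cand ++ f).length < n))).map (cand ++ ·)).map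
            (fun c => 5 ^ (n - c.length))).sum
        ≤ (((pvTokens.filter (fun f => decide ((cand ++ f).length < n))).map (cand ++ ·)).map
            (fun c => 5 ^ (n - c.length))).length • 5 ^ (n - cand.length - 1) := by
          apply List.sum_le_card_nsmul
          intro x hx
          simp only [List.mem_map, List.mem_filter, decide_eq_true_eq] at hx
          obtain ⟨c, ⟨f, ⟨hf, hlt⟩, rfl⟩, rfl⟩ := hx
          have hf1 : 1 ≤ f.length := by
            simp only [pvTokens, List.mem_cons, List.not_mem_nil, or_false] at hf
            rcases hf with rfl | rfl | rfl | rfl <;> decide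
          have hla : (cand ++ f).length = cand.length + f.length := String.length_append _ _
          exact Nat.pow_le_pow_right (by norm_num) (by omega)
      _ = ((pvTokens.filter (fun f => decide ((cand ++ f).length < n))).map (cand ++ ·)).length
            * 5 ^ (n - cand.length - 1) := by simp [smul_eq_mul]
      _ ≤ 4 * 5 ^ (n - cand.length - 1) := Nat.mul_le_mul_right _ hlen
      _ < 5 ^ (n - cand.length) := by
          have hk : n - cand.length = (n - cand.length - 1) + 1 := by omega
          have hp : 0 < 5 ^ (n - cand.length - 1) := pow_pos (by norm_num : (0:ℕ) < 5) _
          calc 4 * 5 ^ (n - cand.length - 1) < 5 * 5 ^ (n - cand.length - 1) := by omega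
            _ = 5 ^ ((n - cand.length - 1) + 1) := by rw [pow_succ]; ring
            _ = 5 ^ (n - cand.length) := by rw [← hk]
  · have hfil : pvTokens.filter (fun f => decide ((cand ++ f).length < n)) = [] := by
      apply List.filter_eq_nil_iff.mpr
      intro f hf
      have : (cand ++ f).length = cand.length + f.length := String.length_append _ _
      simp only [decide_eq_true_eq]
      omega
    rw [hfil]
    simp only [List.map_nil]
    exact pow_pos (by norm_num) _

-- the 'while stack:' loop; stack TOP at the HEAD (Python appends/pops at the list's end)
def pvLoopA (n : Nat) (cands : PySem.Set String) (stack : List String) : PySem.Set String :=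
  match stack with
  | [] => cands
  | cand :: rest =>
      let r := pvFeetA n cand pvTokens cands []
      pvLoopA n r.1 (r.2.reverse ++ rest)
termination_by (stack.map (fun c => 5 ^ (n - c.length))).sum
decreasing_by
  simp only [List.map_append, List.sum_append, List.map_cons, List.sum_cons, List.map_reverse,
    List.sum_reverse]
  have := pvFeetA_weight n cand cands
  omega

def gen_foot_parallel (input : String) : List String :=
  let candidates : PySem.Set String := PySem.Set.add PySem.Set.empty input
  let candidates := pvLoopA input.length candidates [""]
  PySem.List.sorted candidates (fun x => x) false

-- ===== PORT B =====
-- dp[k] for the next k (= dp.length), from the rows already built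
def pvNextRow (dp : List (PySem.Set String)) : PySem.Set String :=
  pvTokens.foldl (fun row f =>
    if f.length ≤ dp.length then
      (dp.getD (dp.length - f.length) PySem.Set.empty).foldl
        (fun row s => PySem.Set.add row (f ++ s)) row
    else row) PySem.Set.empty

-- the 'for k in range(1, n+1): dp.append(row)' loop
def pvBuildDp : Nat → List (PySem.Set String)
  | 0 => [PySem.Set.ofList [""]]
  | k + 1 => pvBuildDp k ++ [pvNextRow (pvBuildDp k)]

def gen_foot_parallel_alt (input : String) : List String :=
  let n := input.length
  let dp := pvBuildDp n
  let result := PySem.Set.add (dp.getD n PySem.Set.empty) input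
  PySem.List.sorted result (fun x => x) false

-- ===== PRECONDITION & SPEC =====
def Spec_gen_foot_parallel (input : String) (out : List String) : Prop := out = gen_foot_parallel_alt input
instance (input : String) (out : List String) : Decidable (Spec_gen_foot_parallel input out) := by unfold Spec_gen_foot_parallel; infer_instance

-- ===== CLAIM (what is proved, stated in full; the proofs are below) =====
def Claim_equal_gen_foot_parallel : Prop := ∀ (input : String), Dom_gen_foot_parallel input → Spec_gen_foot_parallel input (gen_foot_parallel input)

-- ===== LEMMAS AND PROOFS =====

-- x is a concatenation of feet
inductive PvTil : String → Prop
  | nil : PvTil ""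
  | cons (f w : String) : f ∈ pvTokens → PvTil w → PvTil (f ++ w)

-- x is a concatenation of at least one foot
def PvNTil (x : String) : Prop := ∃ f ∈ pvTokens, ∃ w, PvTil w ∧ x = f ++ w

theorem pvToken_len {f : String} (hf : f ∈ pvTokens) : 1 ≤ f.length := by
  simp only [pvTokens, List.mem_cons, List.not_mem_nil, or_false] at hf
  rcases hf with rfl | rfl | rfl | rfl <;> decide

theorem pvNTil_til {x : String} (h : PvNTil x) : PvTil x := by
  obtain ⟨f, hf, w, hw, rfl⟩ := h
  exact PvTil.cons f w hf hw

theorem pvTil_ntil {x : String} (h : PvTil x) (hx : x ≠ "") : PvNTil x := by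
  cases h with
  | nil => exact absurd rfl hx
  | cons f w hf hw => exact ⟨f, hf, w, hw, rfl⟩

theorem pvLen_zero {x : String} (h : x.length = 0) : x = "" :=
  String.length_eq_zero_iff.mp h

theorem mem_pvFeetA_fst (n : Nat) (cand : String) :
    ∀ (fs : List String) (cands : PySem.Set String) (pushed : List String) (x : String),
      x ∈ (pvFeetA n cand fs cands pushed).1 ↔
        x ∈ cands ∨ ∃ f ∈ fs, (cand ++ f).length = n ∧ x = cand ++ f := by
  intro fs
  induction fs with
  | nil => intro cands pushed x; simp [pvFeetA]
  | cons f fs ih =>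
      intro cands pushed x
      simp only [pvFeetA, ih, List.mem_cons]
      by_cases h : (cand ++ f).length = n
      · simp only [if_pos h, PySem.Set.mem_add]
        constructor
        · rintro ((hx | rfl) | ⟨g, hg, hgn, rfl⟩)
          · exact Or.inl hx
          · exact Or.inr ⟨f, Or.inl rfl, h, rfl⟩
          · exact Or.inr ⟨g, Or.inr hg, hgn, rfl⟩
        · rintro (hx | ⟨g, (rfl | hg), hgn, rfl⟩)
          · exact Or.inl (Or.inl hx)
          · exact Or.inl (Or.inr rfl)
          · exact Or.inr ⟨g, hg, hgn, rfl⟩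
      · simp only [if_neg h]
        constructor
        · rintro (hx | ⟨g, hg, hgn, rfl⟩)
          · exact Or.inl hx
          · exact Or.inr ⟨g, Or.inr hg, hgn, rfl⟩
        · rintro (hx | ⟨g, (rfl | hg), hgn, rfl⟩)
          · exact Or.inl hx
          · exact absurd hgn h
          · exact Or.inr ⟨g, hg, hgn, rfl⟩

-- one-step unfolding of "x completes cand to a full tiling"
theorem pvStep (n : Nat) (cand x : String) :
    (∃ w, PvNTil w ∧ x = cand ++ w ∧ x.length = n) ↔
      ((∃ f ∈ pvTokens, (cand ++ f).length = n ∧ x = cand ++ f) ∨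
       (∃ c, (∃ f ∈ pvTokens, c = cand ++ f ∧ c.length < n) ∧
          ∃ w, PvNTil w ∧ x = c ++ w ∧ x.length = n)) := by
  constructor
  · rintro ⟨w, ⟨f, hf, w', hw', rfl⟩, rfl, hlen⟩
    by_cases hw0 : w' = ""
    · subst hw0
      refine Or.inl ⟨f, hf, ?_, by simp⟩
      simpa using hlen
    · have h1 : 1 ≤ w'.length := by
        cases hw' with
        | nil => exact absurd rfl hw0
        | cons g u hg hu => rw [String.length_append]; have := pvToken_len hg; omega
      have hlt : (cand ++ f).length < n := by
        have e1 : (cand ++ (f ++ w')).length = cand.length + (f.length + w'.length) := by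
          rw [String.length_append, String.length_append]
        have e2 : (cand ++ f).length = cand.length + f.length := String.length_append _ _
        omega
      exact Or.inr ⟨cand ++ f, ⟨f, hf, rfl, hlt⟩, w', pvTil_ntil hw' hw0,
        String.append_assoc.symm, hlen⟩
  · rintro (⟨f, hf, hn, rfl⟩ | ⟨c, ⟨f, hf, rfl, _⟩, w, hw, rfl, hlen⟩)
    · exact ⟨f, ⟨f, hf, "", PvTil.nil, by simp⟩, rfl, hn⟩
    · exact ⟨f ++ w, ⟨f, hf, w, pvNTil_til hw, rfl⟩, String.append_assoc, hlen⟩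

theorem mem_pvLoopA (n : Nat) :
    ∀ (cands : PySem.Set String) (stack : List String) (x : String),
      x ∈ pvLoopA n cands stack ↔
        x ∈ cands ∨ ∃ c ∈ stack, ∃ w, PvNTil w ∧ x = c ++ w ∧ x.length = n := by
  intro cands stack
  induction cands, stack using pvLoopA.induct n with
  | case1 cands => intro x; simp [pvLoopA]
  | case2 cands cand rest r ih =>
      intro x
      rw [pvLoopA]
      rw [ih x]
      simp only [List.mem_append, List.mem_reverse, List.mem_cons]
      rw [mem_pvFeetA_fst, pvFeetA_snd]
      simp only [List.nil_append, List.mem_map, List.mem_filter, decide_eq_true_eq]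
      constructor
      · rintro ((hx | hfull) | ⟨c, (⟨f, ⟨hf, hlt⟩, rfl⟩ | hc), hw⟩)
        · exact Or.inl hx
        · exact Or.inr ⟨cand, Or.inl rfl, (pvStep n cand x).mpr (Or.inl hfull)⟩
        · exact Or.inr ⟨cand, Or.inl rfl,
            (pvStep n cand x).mpr (Or.inr ⟨cand ++ f, ⟨f, hf, rfl, hlt⟩, hw⟩)⟩
        · exact Or.inr ⟨c, Or.inr hc, hw⟩
      · rintro (hx | ⟨c, (rfl | hc), hw⟩)
        · exact Or.inl (Or.inl hx)
        · rcases (pvStep n c x).mp hw with hfull | ⟨c', ⟨f, hf, rfl, hlt⟩, hw'⟩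
          · exact Or.inl (Or.inr hfull)
          · exact Or.inr ⟨c ++ f, Or.inl ⟨f, ⟨hf, hlt⟩, rfl⟩, hw'⟩
        · exact Or.inr ⟨c, Or.inr hc, hw⟩

theorem pvLoopA_nodup (n : Nat) :
    ∀ (cands : PySem.Set String) (stack : List String),
      cands.Nodup → (pvLoopA n cands stack).Nodup := by
  have feet : ∀ (fs : List String) (cand : String) (cands : PySem.Set String)
      (pushed : List String), cands.Nodup → (pvFeetA n cand fs cands pushed).1.Nodup := by
    intro fs
    induction fs with
    | nil => intro cand cands pushed h; simpa [pvFeetA] using h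
    | cons f fs ih =>
        intro cand cands pushed h
        simp only [pvFeetA]
        apply ih
        split
        · exact PySem.Set.nodup_add cands _ h
        · exact h
  intro cands stack
  induction cands, stack using pvLoopA.induct n with
  | case1 cands => intro h; simpa [pvLoopA] using h
  | case2 cands cand rest r ih =>
      intro h
      rw [pvLoopA]
      exact ih (feet pvTokens cand cands [] h)

-- B side: length and stability of the dp table
theorem pvBuildDp_length (n : Nat) : (pvBuildDp n).length = n + 1 := by
  induction n with
  | zero => rfl
  | succ k ih => simp [pvBuildDp, ih]

theorem pvBuildDp_getD_stable (n k : Nat) (hk : k ≤ n) :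
    (pvBuildDp n).getD k PySem.Set.empty = (pvBuildDp k).getD k PySem.Set.empty := by
  induction n with
  | zero => interval_cases k; rfl
  | succ m ih =>
      rcases Nat.lt_or_ge k (m + 1) with h | h
      · rw [← ih (by omega)]
        simp only [pvBuildDp]
        rw [List.getD, List.getElem?_append_left (by rw [pvBuildDp_length]; omega)]
        rfl
      · have : k = m + 1 := by omega
        subst this
        rfl

theorem mem_fold_add (f : String) :
    ∀ (l : List String) (acc : PySem.Set String) (x : String),
      x ∈ l.foldl (fun row s => PySem.Set.add row (f ++ s)) acc ↔
        x ∈ acc ∨ ∃ s ∈ l, x = f ++ s := by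
  intro l acc x
  rw [← PySem.Set.update_map_eq_foldl_add, PySem.Set.mem_update]
  simp [eq_comm]

theorem mem_nextRow_fold (dp : List (PySem.Set String)) :
    ∀ (fs : List String) (acc : PySem.Set String) (x : String),
      x ∈ fs.foldl (fun row f =>
          if f.length ≤ dp.length then
            (dp.getD (dp.length - f.length) PySem.Set.empty).foldl
              (fun row s => PySem.Set.add row (f ++ s)) row
          else row) acc ↔
        x ∈ acc ∨ ∃ f ∈ fs, f.length ≤ dp.length ∧
          ∃ s ∈ dp.getD (dp.length - f.length) PySem.Set.empty, x = f ++ s := by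
  intro fs
  induction fs with
  | nil => intro acc x; simp
  | cons f fs ih =>
      intro acc x
      simp only [List.foldl_cons, List.mem_cons]
      by_cases h : f.length ≤ dp.length
      · rw [if_pos h, ih, mem_fold_add]
        constructor
        · rintro ((hx | ⟨s, hs, rfl⟩) | ⟨g, hg, hgd, s, hs, rfl⟩)
          · exact Or.inl hx
          · exact Or.inr ⟨f, Or.inl rfl, h, s, hs, rfl⟩
          · exact Or.inr ⟨g, Or.inr hg, hgd, s, hs, rfl⟩
        · rintro (hx | ⟨g, (rfl | hg), hgd, s, hs, rfl⟩)
          · exact Or.inl (Or.inl hx)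
          · exact Or.inl (Or.inr ⟨s, hs, rfl⟩)
          · exact Or.inr ⟨g, hg, hgd, s, hs, rfl⟩
      · rw [if_neg h, ih]
        constructor
        · rintro (hx | ⟨g, hg, hgd, s, hs, rfl⟩)
          · exact Or.inl hx
          · exact Or.inr ⟨g, Or.inr hg, hgd, s, hs, rfl⟩
        · rintro (hx | ⟨g, (rfl | hg), hgd, s, hs, rfl⟩)
          · exact Or.inl hx
          · exact absurd hgd h
          · exact Or.inr ⟨g, hg, hgd, s, hs, rfl⟩

theorem pvRow_zero : (pvBuildDp 0).getD 0 PySem.Set.empty = [""] := rfl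

theorem pvRow_succ (k : Nat) :
    (pvBuildDp (k + 1)).getD (k + 1) PySem.Set.empty = pvNextRow (pvBuildDp k) := by
  simp only [pvBuildDp]
  rw [List.getD, List.getElem?_append_right (by simp [pvBuildDp_length])]
  simp [pvBuildDp_length]

theorem mem_pvRow : ∀ (k : Nat) (x : String),
    x ∈ (pvBuildDp k).getD k PySem.Set.empty ↔ PvTil x ∧ x.length = k := by
  intro k
  induction k using Nat.strong_induction_on with
  | _ k ih =>
    intro x
    cases k with
    | zero =>
        rw [pvRow_zero]
        constructor
        · intro h
          have hx : x = "" := by simpa using h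
          subst hx; exact ⟨PvTil.nil, rfl⟩
        · rintro ⟨_, hlen⟩
          have := pvLen_zero hlen
          subst this; simp
    | succ k =>
        rw [pvRow_succ, pvNextRow, mem_nextRow_fold]
        have hdplen : (pvBuildDp k).length = k + 1 := pvBuildDp_length k
        simp only [hdplen]
        constructor
        · rintro (hemp | ⟨f, hf, hfk, s, hs, rfl⟩)
          · exact absurd hemp (by simp [PySem.Set.empty])
          have h1 := pvToken_len hf
          rw [pvBuildDp_getD_stable k (k + 1 - f.length) (by omega)] at hs
          obtain ⟨hts, hls⟩ := (ih (k + 1 - f.length) (by omega) s).mp hs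
          refine ⟨PvTil.cons f s hf hts, ?_⟩
          rw [String.length_append]
          omega
        · rintro ⟨ht, hlen⟩
          have hne : x ≠ "" := by
            intro h; subst h; simp at hlen
          obtain ⟨f, hf, w, hw, rfl⟩ := pvTil_ntil ht hne
          have h1 := pvToken_len hf
          rw [String.length_append] at hlen
          refine Or.inr ⟨f, hf, by omega, w, ?_, rfl⟩
          rw [pvBuildDp_getD_stable k (k + 1 - f.length) (by omega)]
          exact (ih (k + 1 - f.length) (by omega) w).mpr ⟨hw, by omega⟩

theorem pvNextRow_nodup (dp : List (PySem.Set String)) : (pvNextRow dp).Nodup := by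
  have inner : ∀ (l : List String) (f : String) (acc : PySem.Set String), acc.Nodup →
      (l.foldl (fun row s => PySem.Set.add row (f ++ s)) acc).Nodup := by
    intro l
    induction l with
    | nil => intro f acc h; exact h
    | cons s l ihl =>
        intro f acc h
        exact ihl f _ (PySem.Set.nodup_add _ _ h)
  have outer : ∀ (fs : List String) (acc : PySem.Set String), acc.Nodup →
      (fs.foldl (fun row f =>
          if f.length ≤ dp.length then
            (dp.getD (dp.length - f.length) PySem.Set.empty).foldl
              (fun row s => PySem.Set.add row (f ++ s)) row
          else row) acc).Nodup := by
    intro fs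
    induction fs with
    | nil => intro acc h; exact h
    | cons f fs ihf =>
        intro acc h
        simp only [List.foldl_cons]
        apply ihf
        split
        · exact inner _ f acc h
        · exact h
  exact outer pvTokens PySem.Set.empty List.nodup_nil

theorem pvRow_nodup (k : Nat) : ((pvBuildDp k).getD k PySem.Set.empty).Nodup := by
  cases k with
  | zero => rw [pvRow_zero]; simp
  | succ k => rw [pvRow_succ]; exact pvNextRow_nodup _

-- ===== VERDICT (by name: the statement is the Claim_ definition above) =====
theorem gen_foot_parallel_spec : Claim_equal_gen_foot_parallel := by
  intro input _
  unfold Spec_gen_foot_parallel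
  simp only [gen_foot_parallel, gen_foot_parallel_alt]
  apply (PySem.List.sorted_id_eq_sorted_id_iff_perm _ _).mpr
  have hnA : (pvLoopA input.length (PySem.Set.add PySem.Set.empty input) [""]).Nodup :=
    pvLoopA_nodup _ _ _ (PySem.Set.nodup_add _ _ List.nodup_nil)
  have hnB : (PySem.Set.add ((pvBuildDp input.length).getD input.length PySem.Set.empty) input).Nodup :=
    PySem.Set.nodup_add _ _ (pvRow_nodup _)
  apply (List.perm_ext_iff_of_nodup hnA hnB).mpr
  intro a
  rw [mem_pvLoopA, PySem.Set.mem_add, PySem.Set.mem_add, mem_pvRow]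
  simp only [PySem.Set.empty, List.not_mem_nil, false_or, List.mem_singleton]
  constructor
  · rintro (rfl | ⟨c, rfl, w, hw, rfl, hlen⟩)
    · exact Or.inr rfl
    · have : ("" : String) ++ w = w := by simp
      rw [this] at hlen ⊢
      exact Or.inl ⟨pvNTil_til hw, hlen⟩
  · rintro (⟨ht, hlen⟩ | rfl)
    · by_cases ha : a = ""
      · subst ha
        simp only [String.length_empty] at hlen
        have : input = "" := pvLen_zero hlen.symm
        exact Or.inl this.symm
      · exact Or.inr ⟨"", rfl, a, pvTil_ntil ht ha, (by simp), hlen⟩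
    · exact Or.inl rfl
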